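-- pv_equiv track=rewrite | github.com/lmokto/challenge | algoritmia.py | desapilarContenedor
-- ===== SOURCE A (Python) =====
-- def retirarContenedor(pilaDeContenedores):
--     return pilaDeContenedores.pop()
--
-- def apilarContenedor(contenedor, pilaDeContenedores):
--     pilaDeContenedores.append(contenedor)
--     return pilaDeContenedores
--
-- def desapilarContenedor(contenedor, pilaDeContenedores):
--     pilaDeContenedoresBuffer = []
--     while len(pilaDeContenedores) != 0:
--         contenedor_buffer = retirarContenedor(pilaDeContenedores)
--         if contenedor_buffer == contenedor:
--             break
--         pilaDeContenedoresBuffer.append(contenedor_buffer)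
--     while len(pilaDeContenedoresBuffer) != 0:
--         apilarContenedor(retirarContenedor(pilaDeContenedoresBuffer), pilaDeContenedores)
--     return pilaDeContenedores
-- ===== SOURCE B (Python) =====
-- def desapilarContenedor(contenedor, pilaDeContenedores):
--     for i in range(len(pilaDeContenedores) - 1, -1, -1):
--         if pilaDeContenedores[i] == contenedor:
--             del pilaDeContenedores[i]
--             break
--     return pilaDeContenedores
-- ===== Notes on version B (the rewrite author's own statement) =====
-- stated objective: simpler
-- what changed: B replaces A's two-phase pop-into-buffer-and-push-back loops with a single downward index scan that deletes the rightmost match in place, maintaining no auxiliary list (measured constant-factor speedup: no element-by-element pop/append traffic).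
import Mathlib
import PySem

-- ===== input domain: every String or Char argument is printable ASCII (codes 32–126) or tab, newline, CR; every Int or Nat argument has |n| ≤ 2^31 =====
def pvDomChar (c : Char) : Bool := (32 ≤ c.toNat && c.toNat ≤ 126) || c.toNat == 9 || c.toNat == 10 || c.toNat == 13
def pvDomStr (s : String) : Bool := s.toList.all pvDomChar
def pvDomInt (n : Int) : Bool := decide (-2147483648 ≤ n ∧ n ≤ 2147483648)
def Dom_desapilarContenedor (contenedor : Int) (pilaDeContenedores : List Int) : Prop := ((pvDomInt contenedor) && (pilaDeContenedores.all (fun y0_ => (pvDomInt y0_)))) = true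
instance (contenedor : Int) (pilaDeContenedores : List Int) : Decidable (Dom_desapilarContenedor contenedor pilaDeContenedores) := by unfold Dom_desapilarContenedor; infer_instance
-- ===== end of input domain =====

-- B replaces A's pop-into-buffer-and-push-back with a single downward index scan deleting the
-- rightmost match in place (simpler; same O(n)).  Both A and B mutate pila in place identically
-- (net effect: rightmost occurrence removed); the theorem is about the returned value.


-- ===== PORT A =====
-- A pops from the END of pila; we transliterate by carrying pila reversed (head = top of stack),
-- so 'pop' is head-removal and the loops are structural recursion on the reversed stack.
-- First while loop: pop until empty or a popped element equals contenedor; popped non-matching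
-- elements are appended to the buffer.  Returns (pila-reversed-after-loop, buffer).
def pvPopLoop (contenedor : Int) : List Int → List Int → List Int × List Int
  | [], buf => ([], buf)
  | x :: rest, buf =>
      if x = contenedor then (rest, buf)
      else pvPopLoop contenedor rest (buf ++ [x])

def desapilarContenedor (contenedor : Int) (pilaDeContenedores : List Int) : List Int :=
  let r := pvPopLoop contenedor pilaDeContenedores.reverse []
  -- second while loop: pop buffer from its end and append back onto pila
  r.1.reverse ++ r.2.reverse

-- ===== PORT B =====
-- B: for i in range(len(pila)-1, -1, -1): if pila[i]==contenedor: del pila[i]; break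
def pvScan (contenedor : Int) (pila : List Int) : List Int → List Int
  | [] => pila
  | i :: rest =>
      match PySem.List.pyGet? pila i with
      | some v =>
          if v = contenedor then pila.take i.toNat ++ pila.drop (i.toNat + 1)
          else pvScan contenedor pila rest
      | none => pila   -- unreachable: indices come from range(len-1,-1,-1)

def desapilarContenedor_alt (contenedor : Int) (pilaDeContenedores : List Int) : List Int :=
  pvScan contenedor pilaDeContenedores
    (PySem.List.pyRange ((pilaDeContenedores.length : Int) - 1) (-1) (-1))

-- ===== PRECONDITION & SPEC =====
def Spec_desapilarContenedor (contenedor : Int) (pilaDeContenedores : List Int) (out : List Int) : Prop := out = desapilarContenedor_alt contenedor pilaDeContenedores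
instance (contenedor : Int) (pilaDeContenedores : List Int) (out : List Int) : Decidable (Spec_desapilarContenedor contenedor pilaDeContenedores out) := by unfold Spec_desapilarContenedor; infer_instance

-- ===== CLAIM (what is proved, stated in full; the proofs are below) =====
def Claim_equal_desapilarContenedor : Prop := ∀ (contenedor : Int) (pilaDeContenedores : List Int), Dom_desapilarContenedor contenedor pilaDeContenedores → Spec_desapilarContenedor contenedor pilaDeContenedores (desapilarContenedor contenedor pilaDeContenedores)

-- ===== LEMMAS AND PROOFS =====

-- canonical description: remove the first occurrence of c (on the reversed stack)
def pvRem (c : Int) : List Int → List Int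
  | [] => []
  | x :: t => if x = c then t else x :: pvRem c t

theorem pvPopLoop_eq (c : Int) (r : List Int) : ∀ buf : List Int,
    (pvPopLoop c r buf).1.reverse ++ (pvPopLoop c r buf).2.reverse
      = (pvRem c r).reverse ++ buf.reverse := by
  induction r with
  | nil => intro buf; simp [pvPopLoop, pvRem]
  | cons x t ih =>
      intro buf
      by_cases h : x = c
      · simp [pvPopLoop, pvRem, h]
      · simp only [pvPopLoop, pvRem, if_neg h, ih]
        simp

theorem desapilarContenedor_eq_rem (c : Int) (p : List Int) :
    desapilarContenedor c p = (pvRem c p.reverse).reverse := by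
  simpa [desapilarContenedor] using pvPopLoop_eq c p.reverse []

theorem pvScan_append (c : Int) (q : List Int) (x : Int) (idxs : List Int)
    (h : ∀ i ∈ idxs, 0 ≤ i ∧ i < (q.length : Int)) :
    pvScan c (q ++ [x]) idxs = pvScan c q idxs ++ [x] := by
  induction idxs with
  | nil => simp [pvScan]
  | cons i rest ih =>
      obtain ⟨h0, hlt⟩ := h i (by simp)
      have hnat : i.toNat < q.length := by omega
      have hget : PySem.List.pyGet? (q ++ [x]) i = some q[i.toNat] := by
        rw [PySem.List.pyGet?_of_nonneg _ h0]
        rw [List.getElem?_append_left hnat]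
        simp [hnat]
      have hgetq : PySem.List.pyGet? q i = some q[i.toNat] := by
        rw [PySem.List.pyGet?_of_nonneg _ h0]
        simp [hnat]
      simp only [pvScan, hget, hgetq]
      by_cases hv : q[i.toNat] = c
      · simp only [if_pos hv]
        have h1 : i.toNat + 1 ≤ q.length := by omega
        rw [List.take_append_of_le_length (by omega), List.drop_append_of_le_length h1]
        simp
      · simp only [if_neg hv]
        exact ih (fun j hj => h j (by simp [hj]))

theorem desapilarContenedor_alt_eq_rem (c : Int) (p : List Int) :
    desapilarContenedor_alt c p = (pvRem c p.reverse).reverse := by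
  unfold desapilarContenedor_alt
  induction p using List.reverseRecOn with
  | nil =>
      simp [pvScan, PySem.List.pyRange_neg_one_eq_nil, pvRem]
  | append_singleton q x ih =>
      have hlen : ((q ++ [x]).length : Int) - 1 = (q.length : Int) := by simp
      rw [hlen, PySem.List.pyRange_neg_one_cons (by omega)]
      have hget : PySem.List.pyGet? (q ++ [x]) (q.length : Int) = some x := by
        exact PySem.List.pyGet?_append_length q [] x
      simp only [pvScan, hget]
      by_cases hx : x = c
      · simp only [if_pos hx]
        rw [List.take_append_of_le_length (by simp), List.drop_eq_nil_of_le (by simp)]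
        simp [pvRem, hx]
      · simp only [if_neg hx]
        rw [pvScan_append c q x _ (by
          intro i hi
          rw [PySem.List.mem_pyRange_neg_one] at hi
          omega)]
        rw [ih]
        simp [pvRem, hx]

-- ===== VERDICT (by name: the statement is the Claim_ definition above) =====
theorem desapilarContenedor_spec : Claim_equal_desapilarContenedor := by
  intro c p _
  show desapilarContenedor c p = desapilarContenedor_alt c p
  rw [desapilarContenedor_eq_rem, desapilarContenedor_alt_eq_rem]
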